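-- pv_equiv track=rewrite | github.com/dazedmind/legalynx | src/app/backend/rag_pipeline/question_splitter.py | _classify_question_type
-- ===== SOURCE A (Python) =====
-- def _classify_question_type(question: str) -> str:
--     """Classify the type of question based on its starting word."""
--     question_lower = question.lower().strip()
--
--     for word in ['who', 'what', 'where', 'when', 'why', 'how', 'which', 'whose', 'whom']:
--         if question_lower.startswith(word + ' '):
--             return word
--
--     for word in ['is', 'are', 'was', 'were']:
--         if question_lower.startswith(word + ' '):
--             return 'is'
--
--     for word in ['does', 'do', 'did']:
--         if question_lower.startswith(word + ' '):
--             return 'does'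
--
--     return 'other'
-- ===== SOURCE B (Python) =====
-- _PAIRS = [
--     ('who', 'who'), ('what', 'what'), ('where', 'where'), ('when', 'when'),
--     ('why', 'why'), ('how', 'how'), ('which', 'which'), ('whose', 'whose'),
--     ('whom', 'whom'),
--     ('is', 'is'), ('are', 'is'), ('was', 'is'), ('were', 'is'),
--     ('does', 'does'), ('do', 'does'), ('did', 'does'),
-- ]
--
-- def _make_dfa(pairs):
--     """Build a character trie (DFA): transitions keyed by (state, char),
--     accepting states labelled with the category."""
--     trans = {}
--     accept = {}
--     counter = 1
--     for word, label in pairs: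
--         s = 0
--         for ch in word:
--             nxt = trans.get((s, ch))
--             if nxt is None:
--                 nxt = counter
--                 trans[(s, ch)] = nxt
--                 counter += 1
--             s = nxt
--         accept[s] = label
--     return trans, accept
--
-- _TRANS, _ACCEPT = _make_dfa(_PAIRS)
--
-- def _classify_question_type(question: str) -> str:
--     """Single pass over the characters, driving the trie DFA; the first space
--     decides: return the label of the accepting state, or 'other'."""
--     state = 0
--     for ch in question.lower().strip():
--         if ch == ' ':
--             return _ACCEPT.get(state, 'other')
--         nxt = _TRANS.get((state, ch))
--         if nxt is None:
--             return 'other'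
--         state = nxt
--     return 'other'
-- ===== Notes on version B (the rewrite author's own statement) =====
-- stated objective: alternative
-- what changed: Replaces A's three sequential startswith scans over keyword lists by a character trie (DFA) built once from the word/label pairs and driven in a single pass over the string, deciding at the first space.
import Mathlib
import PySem

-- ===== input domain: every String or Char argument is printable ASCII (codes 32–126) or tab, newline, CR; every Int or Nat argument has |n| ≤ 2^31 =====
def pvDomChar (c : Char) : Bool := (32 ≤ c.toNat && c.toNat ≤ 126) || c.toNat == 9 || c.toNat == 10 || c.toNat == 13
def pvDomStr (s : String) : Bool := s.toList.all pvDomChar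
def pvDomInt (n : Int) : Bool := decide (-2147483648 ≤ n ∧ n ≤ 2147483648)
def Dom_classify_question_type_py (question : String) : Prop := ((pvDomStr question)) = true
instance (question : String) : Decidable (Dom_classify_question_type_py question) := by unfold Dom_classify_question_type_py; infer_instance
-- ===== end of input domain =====

-- B replaces A's sequential startswith loops over three keyword lists by a character
-- trie (DFA built once from the word/label pairs) driven in a single pass over the
-- string, deciding at the first space (objective: alternative).

-- ===== PORT A =====
def classify_question_type_py (question : String) : String :=
  let ql := PySem.Str.strip (PySem.Str.lower question)
  match ["who","what","where","when","why","how","which","whose","whom"].find?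
      (fun w => PySem.Str.startswith ql (w ++ " ")) with
  | some w => w
  | none =>
    match ["is","are","was","were"].find? (fun w => PySem.Str.startswith ql (w ++ " ")) with
    | some _ => "is"
    | none =>
      match ["does","do","did"].find? (fun w => PySem.Str.startswith ql (w ++ " ")) with
      | some _ => "does"
      | none => "other"

-- ===== PORT B =====
-- word/label pairs the trie is built from (Python _PAIRS)
def pvPairs : List (String × String) :=
  [("who", "who"), ("what", "what"), ("where", "where"), ("when", "when"),
   ("why", "why"), ("how", "how"), ("which", "which"), ("whose", "whose"),
   ("whom", "whom"),
   ("is", "is"), ("are", "is"), ("was", "is"), ("were", "is"),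
   ("does", "does"), ("do", "does"), ("did", "does")]

-- Python _make_dfa: fold over the pairs; state = (trans, accept, counter);
-- inner fold over the word's chars with state (trans, counter, current state s)
def pvMakeDfa : PySem.Dict (Int × Char) Int × PySem.Dict Int String :=
  let r := pvPairs.foldl
    (fun (acc : PySem.Dict (Int × Char) Int × PySem.Dict Int String × Int) p =>
      let inner := p.1.toList.foldl
        (fun (st : PySem.Dict (Int × Char) Int × Int × Int) ch =>
          match st.1.get? (st.2.2, ch) with
          | some nxt => (st.1, st.2.1, nxt)
          | none => (st.1.insert (st.2.2, ch) st.2.1, st.2.1 + 1, st.2.1))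
        (acc.1, acc.2.2, 0)
      (inner.1, acc.2.1.insert inner.2.2 p.2, inner.2.1))
    (PySem.Dict.empty, PySem.Dict.empty, 1)
  (r.1, r.2.1)

-- the for-loop of B: drive the DFA over the characters; first space decides
def pvRun (tr : PySem.Dict (Int × Char) Int) (ac : PySem.Dict Int String) : Int → List Char → String
  | _, [] => "other"
  | s, c :: cs =>
    if c = ' ' then ac.getD s "other"
    else match tr.get? (s, c) with
      | none => "other"
      | some s' => pvRun tr ac s' cs

def classify_question_type_py_alt (question : String) : String :=
  pvRun pvMakeDfa.1 pvMakeDfa.2 0 (PySem.Str.strip (PySem.Str.lower question)).toList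

-- ===== PRECONDITION & SPEC =====
def Spec_classify_question_type_py (question : String) (out : String) : Prop := out = classify_question_type_py_alt question
instance (question : String) (out : String) : Decidable (Spec_classify_question_type_py question out) := by unfold Spec_classify_question_type_py; infer_instance

-- ===== CLAIM (what is proved, stated in full; the proofs are below) =====
def Claim_equal_classify_question_type_py : Prop := ∀ (question : String), Dom_classify_question_type_py question → Spec_classify_question_type_py question (classify_question_type_py question)

-- ===== LEMMAS AND PROOFS =====

-- A-side: startswith (w ++ ' ') in terms of the first space-delimited word
theorem pv_prefix_space (w cs : List Char) (hw : ' ' ∉ w) :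
    (w ++ [' ']) <+: cs ↔ (cs.takeWhile (· ≠ ' ') = w ∧ ¬ cs.dropWhile (· ≠ ' ') = []) := by
  induction w generalizing cs with
  | nil =>
    cases cs with
    | nil => simp
    | cons d cs' =>
      rw [List.takeWhile_cons, List.dropWhile_cons]
      by_cases hd : d = ' '
      · subst hd; simp [List.cons_prefix_cons]
      · simp [hd, List.cons_prefix_cons, Ne.symm hd]
  | cons c w' ih =>
    have hc : c ≠ ' ' := fun h => hw (h ▸ List.mem_cons_self)
    have hw' : ' ' ∉ w' := fun h => hw (List.mem_cons_of_mem _ h)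
    cases cs with
    | nil => simp
    | cons d cs' =>
      rw [List.takeWhile_cons, List.dropWhile_cons]
      by_cases hd : d = c
      · subst hd
        simp [hc, List.cons_prefix_cons, ih cs' hw']
      · by_cases hd' : d = ' '
        · subst hd'
          simp [List.cons_prefix_cons, hc]
        · simp [hd', List.cons_prefix_cons, hd]
          exact fun h => absurd h.symm hd

def pvCond (cs w : List Char) : Bool :=
  decide (cs.takeWhile (· ≠ ' ') = w) && !(cs.dropWhile (· ≠ ' ')).isEmpty

theorem pv_sw (question : String) (w : String) (hw : ' ' ∉ w.toList) :
    PySem.Str.startswith (PySem.Str.strip (PySem.Str.lower question)) (w ++ " ")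
      = pvCond (PySem.Str.strip (PySem.Str.lower question)).toList w.toList := by
  rw [Bool.eq_iff_iff]
  unfold pvCond
  simp only [PySem.Str.startswith_eq, PySem.Chars.startswith_iff, Bool.and_eq_true,
    decide_eq_true_eq, Bool.not_eq_true', List.isEmpty_eq_false_iff]
  have h2 : (w ++ " ").toList = w.toList ++ [' '] := by simp
  rw [h2, pv_prefix_space _ _ hw]

-- B-side proof infrastructure: the trie path function and a table of reachable states
def pvTrans : PySem.Dict (Int × Char) Int := pvMakeDfa.1
def pvAccept : PySem.Dict Int String := pvMakeDfa.2
def pvStep (o : Option Int) (c : Char) : Option Int := o.bind fun s => pvTrans.get? (s, c)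
def pvPath (o : Option Int) (w : List Char) : Option Int := w.foldl pvStep o

def pvPathTable : List (Int × List Char) :=
  [(0, []), (1, ['w']), (2, ['w', 'h']), (3, ['w', 'h', 'o']),
   (4, ['w', 'h', 'a']), (5, ['w', 'h', 'a', 't']), (6, ['w', 'h', 'e']), (7, ['w', 'h', 'e', 'r']),
   (8, ['w', 'h', 'e', 'r', 'e']), (9, ['w', 'h', 'e', 'n']), (10, ['w', 'h', 'y']), (11, ['h']),
   (12, ['h', 'o']), (13, ['h', 'o', 'w']), (14, ['w', 'h', 'i']), (15, ['w', 'h', 'i', 'c']),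
   (16, ['w', 'h', 'i', 'c', 'h']), (17, ['w', 'h', 'o', 's']), (18, ['w', 'h', 'o', 's', 'e']), (19, ['w', 'h', 'o', 'm']),
   (20, ['i']), (21, ['i', 's']), (22, ['a']), (23, ['a', 'r']),
   (24, ['a', 'r', 'e']), (25, ['w', 'a']), (26, ['w', 'a', 's']), (27, ['w', 'e']),
   (28, ['w', 'e', 'r']), (29, ['w', 'e', 'r', 'e']), (30, ['d']), (31, ['d', 'o']),
   (32, ['d', 'o', 'e']), (33, ['d', 'o', 'e', 's']), (34, ['d', 'i']), (35, ['d', 'i', 'd'])]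

-- the classification of the first word, as a chain of equality tests (proof vocabulary)
def pvLookup16 (k : List Char) : String :=
  if k = "who".toList then "who" else if k = "what".toList then "what"
  else if k = "where".toList then "where" else if k = "when".toList then "when"
  else if k = "why".toList then "why" else if k = "how".toList then "how"
  else if k = "which".toList then "which" else if k = "whose".toList then "whose"
  else if k = "whom".toList then "whom" else if k = "is".toList then "is"
  else if k = "are".toList then "is" else if k = "was".toList then "is"
  else if k = "were".toList then "is" else if k = "does".toList then "does"
  else if k = "do".toList then "does" else if k = "did".toList then "does"
  else "other"

theorem pvPath_none (w : List Char) : pvPath none w = none := by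
  induction w with
  | nil => rfl
  | cons c cs ih => simpa [pvPath, pvStep] using ih

theorem pvPath_append (o : Option Int) (p q : List Char) :
    pvPath o (p ++ q) = pvPath (pvPath o p) q := List.foldl_append

-- every transition of the trie extends a tabulated path to a tabulated path
set_option maxRecDepth 8192 in
theorem pvClosure : ∀ e ∈ pvTrans.items, ∀ q ∈ pvPathTable,
    q.1 = e.1.1 → (e.2, q.2 ++ [e.1.2]) ∈ pvPathTable := by decide

theorem pvPath_mem_table (w : List Char) : ∀ s : Int, pvPath (some 0) w = some s → (s, w) ∈ pvPathTable := by
  induction w using List.reverseRecOn with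
  | nil =>
    intro s h
    have : s = 0 := by simpa [pvPath, pvStep] using h.symm
    subst this; decide
  | append_singleton p c ih =>
    intro s h
    rw [pvPath_append] at h
    cases hp : pvPath (some 0) p with
    | none => rw [hp, pvPath_none] at h; exact absurd h (by simp)
    | some t =>
      rw [hp] at h
      have ht : pvTrans.get? (t, c) = some s := by simpa [pvPath, pvStep] using h
      have hmem : ((t, c), s) ∈ pvTrans.items := PySem.Dict.mem_items_of_get?_eq_some pvTrans ht
      exact pvClosure ((t, c), s) hmem (t, p) (ih t hp) rfl

set_option maxRecDepth 8192 in
theorem pvAccept_table : ∀ q ∈ pvPathTable, pvAccept.getD q.1 "other" = pvLookup16 q.2 := by decide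

-- the DFA's decision at the first space equals the 16-way word lookup
set_option maxRecDepth 16384 in
theorem pvMatch_eq (k : List Char) :
    (match pvPath (some 0) k with
     | some s => pvAccept.getD s "other"
     | none => "other") = pvLookup16 k := by
  cases hps : pvPath (some 0) k with
  | some s => exact pvAccept_table (s, k) (pvPath_mem_table k s hps)
  | none =>
    show "other" = pvLookup16 k
    by_cases h0 : k = "who".toList
    · exfalso; rw [h0] at hps; exact absurd hps (by decide)
    by_cases h1 : k = "what".toList
    · exfalso; rw [h1] at hps; exact absurd hps (by decide)
    by_cases h2 : k = "where".toList
    · exfalso; rw [h2] at hps; exact absurd hps (by decide)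
    by_cases h3 : k = "when".toList
    · exfalso; rw [h3] at hps; exact absurd hps (by decide)
    by_cases h4 : k = "why".toList
    · exfalso; rw [h4] at hps; exact absurd hps (by decide)
    by_cases h5 : k = "how".toList
    · exfalso; rw [h5] at hps; exact absurd hps (by decide)
    by_cases h6 : k = "which".toList
    · exfalso; rw [h6] at hps; exact absurd hps (by decide)
    by_cases h7 : k = "whose".toList
    · exfalso; rw [h7] at hps; exact absurd hps (by decide)
    by_cases h8 : k = "whom".toList
    · exfalso; rw [h8] at hps; exact absurd hps (by decide)
    by_cases h9 : k = "is".toList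
    · exfalso; rw [h9] at hps; exact absurd hps (by decide)
    by_cases h10 : k = "are".toList
    · exfalso; rw [h10] at hps; exact absurd hps (by decide)
    by_cases h11 : k = "was".toList
    · exfalso; rw [h11] at hps; exact absurd hps (by decide)
    by_cases h12 : k = "were".toList
    · exfalso; rw [h12] at hps; exact absurd hps (by decide)
    by_cases h13 : k = "does".toList
    · exfalso; rw [h13] at hps; exact absurd hps (by decide)
    by_cases h14 : k = "do".toList
    · exfalso; rw [h14] at hps; exact absurd hps (by decide)
    by_cases h15 : k = "did".toList
    · exfalso; rw [h15] at hps; exact absurd hps (by decide)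
    unfold pvLookup16
    rw [if_neg h0, if_neg h1, if_neg h2, if_neg h3, if_neg h4, if_neg h5, if_neg h6,
        if_neg h7, if_neg h8, if_neg h9, if_neg h10, if_neg h11, if_neg h12, if_neg h13,
        if_neg h14, if_neg h15]

-- running B's loop from a tabulated state, on any remaining input
theorem pvRun_eq (cs : List Char) : ∀ (s : Int) (p : List Char), pvPath (some 0) p = some s →
    pvRun pvTrans pvAccept s cs =
      if (cs.dropWhile (· ≠ ' ')).isEmpty then "other"
      else match pvPath (some 0) (p ++ cs.takeWhile (· ≠ ' ')) with
           | some s' => pvAccept.getD s' "other"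
           | none => "other" := by
  induction cs with
  | nil =>
    intro s p hp
    rw [show pvRun pvTrans pvAccept s [] = "other" from rfl]
    simp
  | cons c cs ih =>
    intro s p hp
    by_cases hc : c = ' '
    · subst hc
      rw [show pvRun pvTrans pvAccept s (' ' :: cs) = pvAccept.getD s "other" from rfl]
      simp [hp]
    · have hcd : decide (c ≠ ' ') = true := by simp [hc]
      rw [List.takeWhile_cons, List.dropWhile_cons]
      simp only [hcd, if_true]
      cases ht : pvTrans.get? (s, c) with
      | none =>
        have hnone : pvPath (some 0) (p ++ c :: List.takeWhile (fun x => decide (x ≠ ' ')) cs) = none := by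
          have he : p ++ c :: List.takeWhile (fun x => decide (x ≠ ' ')) cs
              = (p ++ [c]) ++ List.takeWhile (fun x => decide (x ≠ ' ')) cs := by simp
          have hstep : pvPath (some 0) (p ++ [c]) = none := by
            rw [pvPath_append, hp]; simpa [pvPath, pvStep] using ht
          rw [he, pvPath_append, hstep, pvPath_none]
        rw [hnone]
        have hlhs : pvRun pvTrans pvAccept s (c :: cs) = "other" := by
          conv_lhs => rw [pvRun]
          rw [if_neg hc, ht]
        rw [hlhs]
        split <;> rfl
      | some s' =>
        have hstep : pvPath (some 0) (p ++ [c]) = some s' := by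
          rw [pvPath_append, hp]; simpa [pvPath, pvStep] using ht
        have he : p ++ c :: List.takeWhile (fun x => decide (x ≠ ' ')) cs
            = (p ++ [c]) ++ List.takeWhile (fun x => decide (x ≠ ' ')) cs := by simp
        rw [he]
        have hrun : pvRun pvTrans pvAccept s (c :: cs) = pvRun pvTrans pvAccept s' cs := by
          conv_lhs => rw [pvRun]
          rw [if_neg hc, ht]
        rw [hrun]
        exact ih s' (p ++ [c]) hstep

theorem pv_main (question : String) :
    classify_question_type_py question = classify_question_type_py_alt question := by
  unfold classify_question_type_py classify_question_type_py_alt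
  simp only [List.find?_cons, List.find?_nil]
  rw [pv_sw question "who" (by decide), pv_sw question "what" (by decide),
      pv_sw question "where" (by decide), pv_sw question "when" (by decide),
      pv_sw question "why" (by decide), pv_sw question "how" (by decide),
      pv_sw question "which" (by decide), pv_sw question "whose" (by decide),
      pv_sw question "whom" (by decide), pv_sw question "is" (by decide),
      pv_sw question "are" (by decide), pv_sw question "was" (by decide),
      pv_sw question "were" (by decide), pv_sw question "does" (by decide),
      pv_sw question "do" (by decide), pv_sw question "did" (by decide)]
  have hrun := pvRun_eq (PySem.Str.strip (PySem.Str.lower question)).toList 0 [] (by rfl)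
  rw [List.nil_append] at hrun
  show _ = pvRun pvTrans pvAccept 0 (PySem.Str.strip (PySem.Str.lower question)).toList
  rw [hrun]
  unfold pvCond
  generalize (PySem.Str.strip (PySem.Str.lower question)).toList = cs
  rw [pvMatch_eq]
  cases hr : (cs.dropWhile (· ≠ ' ')).isEmpty with
  | true =>
    simp only [Bool.not_true, Bool.and_false]
    rfl
  | false =>
    simp only [Bool.not_false, Bool.and_true, if_neg Bool.false_ne_true]
    generalize List.takeWhile (fun x => decide (x ≠ ' ')) cs = k
    unfold pvLookup16
    by_cases h0 : k = "who".toList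
    · simp only [h0]; rfl
    by_cases h1 : k = "what".toList
    · simp only [h1]; rfl
    by_cases h2 : k = "where".toList
    · simp only [h2]; rfl
    by_cases h3 : k = "when".toList
    · simp only [h3]; rfl
    by_cases h4 : k = "why".toList
    · simp only [h4]; rfl
    by_cases h5 : k = "how".toList
    · simp only [h5]; rfl
    by_cases h6 : k = "which".toList
    · simp only [h6]; rfl
    by_cases h7 : k = "whose".toList
    · simp only [h7]; rfl
    by_cases h8 : k = "whom".toList
    · simp only [h8]; rfl
    by_cases h9 : k = "is".toList
    · simp only [h9]; rfl
    by_cases h10 : k = "are".toList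
    · simp only [h10]; rfl
    by_cases h11 : k = "was".toList
    · simp only [h11]; rfl
    by_cases h12 : k = "were".toList
    · simp only [h12]; rfl
    by_cases h13 : k = "does".toList
    · simp only [h13]; rfl
    by_cases h14 : k = "do".toList
    · simp only [h14]; rfl
    by_cases h15 : k = "did".toList
    · simp only [h15]; rfl
    simp only [h0, h1, h2, h3, h4, h5, h6, h7, h8, h9, h10, h11, h12, h13, h14, h15,
      decide_false, if_false]

-- ===== VERDICT (by name: the statement is the Claim_ definition above) =====
theorem classify_question_type_py_spec : Claim_equal_classify_question_type_py := by
  intro question _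
  unfold Spec_classify_question_type_py
  exact pv_main question
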